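-- pv_equiv track=rewrite | github.com/ilise/Buyer-Intelligence-for-Manhattan-Real-Estate | manhattan_dev_tracker.py | _is_residential
-- ===== SOURCE A (Python) =====
-- NON_RESIDENTIAL_BUILDING_TYPES = {
--     "HOTEL",
--     "GARAGE",
--     "OFFICE",
--     "COMMERCIAL",
--     "FACTORY",
--     "WAREHOUSE",
--     "PARKING",
--     "PLACE OF ASSEMBLY",
--     "STORAGE",
-- }
--
-- def _is_residential(bldg_type):
--     """
--     Return False only if the building type is explicitly non-residential.
--     Blank or unknown = True (keep). This avoids dropping the many DOB
--     records where building type is not populated.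
--     """
--     if not bldg_type or not bldg_type.strip():
--         return True  # blank = keep
--     bt = bldg_type.strip().upper()
--     for excluded in NON_RESIDENTIAL_BUILDING_TYPES:
--         if excluded in bt:
--             return False
--     return True  # anything else = keep
-- ===== SOURCE B (Python) =====
-- NON_RESIDENTIAL_BUILDING_TYPES = {
--     "HOTEL",
--     "GARAGE",
--     "OFFICE",
--     "COMMERCIAL",
--     "FACTORY",
--     "WAREHOUSE",
--     "PARKING",
--     "PLACE OF ASSEMBLY",
--     "STORAGE",
-- }
--
-- # keywords grouped by length, for a single left-to-right scan of the string
-- _KW_BY_LEN = {}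
-- for _kw in NON_RESIDENTIAL_BUILDING_TYPES:
--     _KW_BY_LEN.setdefault(len(_kw), set()).add(_kw)
-- _KW_BY_LEN = sorted(_KW_BY_LEN.items())
--
--
-- def _is_residential(bldg_type):
--     """Single scan over the normalized string: at each position, hash-probe the
--     fixed-length windows against the keyword sets, instead of one substring
--     search per keyword."""
--     if not bldg_type or not bldg_type.strip():
--         return True
--     bt = bldg_type.strip().upper()
--     n = len(bt)
--     for i in range(n):
--         for L, kws in _KW_BY_LEN:
--             if i + L <= n and bt[i:i + L] in kws:
--                 return False
--     return True
-- ===== Notes on version B (the rewrite author's own statement) =====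
-- stated objective: alternative
-- what changed: Replaces the per-keyword loop of substring searches with a single left-to-right scan of the normalized string that probes each position's fixed-length windows against keyword sets grouped by length.
import Mathlib
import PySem

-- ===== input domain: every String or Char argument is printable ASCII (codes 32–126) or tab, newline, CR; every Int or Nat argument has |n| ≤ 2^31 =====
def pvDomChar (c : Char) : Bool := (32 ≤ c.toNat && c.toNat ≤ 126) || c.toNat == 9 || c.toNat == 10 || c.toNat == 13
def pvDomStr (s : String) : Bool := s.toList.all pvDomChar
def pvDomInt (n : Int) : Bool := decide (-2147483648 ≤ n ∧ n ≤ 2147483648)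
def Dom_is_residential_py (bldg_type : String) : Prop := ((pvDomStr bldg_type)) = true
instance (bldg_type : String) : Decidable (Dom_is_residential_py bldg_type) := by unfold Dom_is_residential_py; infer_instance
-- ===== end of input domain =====

-- B replaces the per-keyword substring searches with one left-to-right scan of the
-- normalized string, probing fixed-length windows against length-grouped keyword sets
-- (objective: alternative traversal, same result).

-- ===== PORT A =====
-- the module-level set NON_RESIDENTIAL_BUILDING_TYPES (iteration order does not
-- affect the result: the loop only tests substring containment and returns False on any hit)
def nonResidentialTypes : List (List Char) :=
  ["HOTEL".toList, "GARAGE".toList, "OFFICE".toList, "COMMERCIAL".toList,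
   "FACTORY".toList, "WAREHOUSE".toList, "PARKING".toList,
   "PLACE OF ASSEMBLY".toList, "STORAGE".toList]

def is_residential_py (bldg_type : String) : Bool :=
  if bldg_type = "" then true
  else if PySem.Chars.strip bldg_type.toList = [] then true
  else
    let bt := PySem.Chars.upper (PySem.Chars.strip bldg_type.toList)
    -- 'for excluded in …: if excluded in bt: return False' / 'return True'
    ! nonResidentialTypes.any (fun excluded => PySem.Chars.isIn excluded bt)

-- ===== PORT B =====
-- _KW_BY_LEN: keywords grouped by length, ascending lengths
def kwByLen : List (Nat × List (List Char)) :=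
  [(5, ["HOTEL".toList]),
   (6, ["GARAGE".toList, "OFFICE".toList]),
   (7, ["FACTORY".toList, "PARKING".toList, "STORAGE".toList]),
   (9, ["WAREHOUSE".toList]),
   (10, ["COMMERCIAL".toList]),
   (17, ["PLACE OF ASSEMBLY".toList])]

def is_residential_py_alt (bldg_type : String) : Bool :=
  if bldg_type = "" then true
  else if PySem.Chars.strip bldg_type.toList = [] then true
  else
    let bt := PySem.Chars.upper (PySem.Chars.strip bldg_type.toList)
    let n := bt.length
    -- 'for i in range(n): for L, kws in _KW_BY_LEN: if i + L <= n and bt[i:i+L] in kws: return False'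
    ! (List.range n).any (fun i =>
        kwByLen.any (fun p =>
          decide (i + p.1 ≤ n) && p.2.contains ((bt.drop i).take p.1)))

-- ===== PRECONDITION & SPEC =====
def Spec_is_residential_py (bldg_type : String) (out : Bool) : Prop := out = is_residential_py_alt bldg_type
instance (bldg_type : String) (out : Bool) : Decidable (Spec_is_residential_py bldg_type out) := by unfold Spec_is_residential_py; infer_instance

-- ===== CLAIM (what is proved, stated in full; the proofs are below) =====
def Claim_equal_is_residential_py : Prop := ∀ (bldg_type : String), Dom_is_residential_py bldg_type → Spec_is_residential_py bldg_type (is_residential_py bldg_type)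

-- ===== LEMMAS AND PROOFS =====

-- a nonempty keyword of length L occurs as an infix of u iff some in-range L-window of u equals it
theorem window_scan_iff (kw u : List Char) (L : Nat) (hne : kw ≠ []) (hlen : kw.length = L) :
    (∃ i < u.length, i + L ≤ u.length ∧ (u.drop i).take L = kw) ↔ kw <:+: u := by
  subst hlen
  constructor
  · rintro ⟨i, _, _, htake⟩
    exact (htake ▸ (List.take_prefix _ _)).isInfix.trans (u.drop_suffix i).isInfix
  · rintro ⟨s, t, rfl⟩
    have hk : kw.length ≠ 0 := fun h => hne (List.eq_nil_of_length_eq_zero h)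
    refine ⟨s.length, by simp; omega, by simp, by simp⟩

-- the two matching loops agree: per-keyword substring search = single window scan
theorem scan_eq (u : List Char) :
    nonResidentialTypes.any (fun excluded => PySem.Chars.isIn excluded u)
      = (List.range u.length).any (fun i =>
          kwByLen.any (fun p =>
            decide (i + p.1 ≤ u.length) && p.2.contains ((u.drop i).take p.1))) := by
  rw [Bool.eq_iff_iff]
  simp only [List.any_eq_true]
  constructor
  · rintro ⟨kw, hmem, hIn⟩
    rw [PySem.Chars.isIn_iff_infix] at hIn
    simp only [List.mem_range]
    fin_cases hmem
    · obtain ⟨i, hi, h1, h2⟩ := (window_scan_iff _ u 5 (by decide) (by decide)).2 hIn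
      exact ⟨i, hi, (5, ["HOTEL".toList]), by simp [kwByLen], by simp [h1, h2]⟩
    · obtain ⟨i, hi, h1, h2⟩ := (window_scan_iff _ u 6 (by decide) (by decide)).2 hIn
      exact ⟨i, hi, (6, ["GARAGE".toList, "OFFICE".toList]), by simp [kwByLen], by simp [h1, h2]⟩
    · obtain ⟨i, hi, h1, h2⟩ := (window_scan_iff _ u 6 (by decide) (by decide)).2 hIn
      exact ⟨i, hi, (6, ["GARAGE".toList, "OFFICE".toList]), by simp [kwByLen], by simp [h1, h2]⟩
    · obtain ⟨i, hi, h1, h2⟩ := (window_scan_iff _ u 10 (by decide) (by decide)).2 hIn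
      exact ⟨i, hi, (10, ["COMMERCIAL".toList]), by simp [kwByLen], by simp [h1, h2]⟩
    · obtain ⟨i, hi, h1, h2⟩ := (window_scan_iff _ u 7 (by decide) (by decide)).2 hIn
      exact ⟨i, hi, (7, ["FACTORY".toList, "PARKING".toList, "STORAGE".toList]), by simp [kwByLen], by simp [h1, h2]⟩
    · obtain ⟨i, hi, h1, h2⟩ := (window_scan_iff _ u 9 (by decide) (by decide)).2 hIn
      exact ⟨i, hi, (9, ["WAREHOUSE".toList]), by simp [kwByLen], by simp [h1, h2]⟩
    · obtain ⟨i, hi, h1, h2⟩ := (window_scan_iff _ u 7 (by decide) (by decide)).2 hIn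
      exact ⟨i, hi, (7, ["FACTORY".toList, "PARKING".toList, "STORAGE".toList]), by simp [kwByLen], by simp [h1, h2]⟩
    · obtain ⟨i, hi, h1, h2⟩ := (window_scan_iff _ u 17 (by decide) (by decide)).2 hIn
      exact ⟨i, hi, (17, ["PLACE OF ASSEMBLY".toList]), by simp [kwByLen], by simp [h1, h2]⟩
    · obtain ⟨i, hi, h1, h2⟩ := (window_scan_iff _ u 7 (by decide) (by decide)).2 hIn
      exact ⟨i, hi, (7, ["FACTORY".toList, "PARKING".toList, "STORAGE".toList]), by simp [kwByLen], by simp [h1, h2]⟩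
  · rintro ⟨i, hiR, p, hp, hcond⟩
    rw [List.mem_range] at hiR
    have mk : ∀ (kw : List Char) (L : Nat), kw.length = L → kw ≠ [] → kw ∈ nonResidentialTypes →
        i + L ≤ u.length → (u.drop i).take L = kw →
        ∃ kw ∈ nonResidentialTypes, PySem.Chars.isIn kw u = true := by
      intro kw L hlen hne hmem h1 h2
      exact ⟨kw, hmem,
        (PySem.Chars.isIn_iff_infix kw u).2 ((window_scan_iff kw u L hne hlen).1 ⟨i, hiR, h1, h2⟩)⟩
    fin_cases hp <;> simp only [Bool.and_eq_true, decide_eq_true_eq,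
      List.contains_eq_mem, List.mem_cons, List.not_mem_nil, or_false, decide_eq_true_eq] at hcond
    · exact mk _ 5 (by decide) (by decide) (by decide) hcond.1 hcond.2
    · rcases hcond.2 with h | h
      · exact mk _ 6 (by decide) (by decide) (by decide) hcond.1 h
      · exact mk _ 6 (by decide) (by decide) (by decide) hcond.1 h
    · rcases hcond.2 with h | h | h
      · exact mk _ 7 (by decide) (by decide) (by decide) hcond.1 h
      · exact mk _ 7 (by decide) (by decide) (by decide) hcond.1 h
      · exact mk _ 7 (by decide) (by decide) (by decide) hcond.1 h
    · exact mk _ 9 (by decide) (by decide) (by decide) hcond.1 hcond.2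
    · exact mk _ 10 (by decide) (by decide) (by decide) hcond.1 hcond.2
    · exact mk _ 17 (by decide) (by decide) (by decide) hcond.1 hcond.2

-- ===== VERDICT (by name: the statement is the Claim_ definition above) =====
theorem is_residential_py_spec : Claim_equal_is_residential_py := by
  intro bldg_type _
  unfold Spec_is_residential_py is_residential_py is_residential_py_alt
  split
  · rfl
  · split
    · rfl
    · simp only [scan_eq]
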